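-- pv_equiv track=rewrite | github.com/sdfrew2/stuff | aoc2020/5/day5.py | parseBinary
-- ===== SOURCE A (Python) =====
-- def parseBinary(s, one, zero):
--     result = 0
--     for c in s:
--         if c == one:
--             result = 2*result + 1
--         elif c == zero:
--             result = 2*result
--     return result
-- ===== SOURCE B (Python) =====
-- def parseBinary(s, one, zero):
--     bits = ''.join('1' if c == one else '0' for c in s if c == one or c == zero)
--     return int(bits or '0', 2)
-- ===== Notes on version B (the rewrite author's own statement) =====
-- stated objective: idiomatic
-- what changed: B builds a '0'/'1' bit string from the matched characters and delegates the conversion to int(bits or '0', 2), replacing A's manual Horner-style bit accumulation loop.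
import Mathlib
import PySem

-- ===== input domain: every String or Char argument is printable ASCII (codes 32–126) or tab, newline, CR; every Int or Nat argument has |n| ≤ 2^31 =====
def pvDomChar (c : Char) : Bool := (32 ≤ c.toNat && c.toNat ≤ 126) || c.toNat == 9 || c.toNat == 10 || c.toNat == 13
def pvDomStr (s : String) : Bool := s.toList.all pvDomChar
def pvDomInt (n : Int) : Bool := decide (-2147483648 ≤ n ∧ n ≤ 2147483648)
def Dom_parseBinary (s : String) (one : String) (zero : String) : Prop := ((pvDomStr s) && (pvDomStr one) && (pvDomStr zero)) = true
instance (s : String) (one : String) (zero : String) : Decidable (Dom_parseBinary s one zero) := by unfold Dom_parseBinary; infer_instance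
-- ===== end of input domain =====

-- B replaces A's manual Horner-style bit accumulation with building a '0'/'1' string and one library base-2 parse (objective: idiomatic).

-- ===== PORT A =====
-- A's loop: result := 0; for c in s: if c == one: result = 2*result+1 elif c == zero: result = 2*result
-- (Python compares the 1-char string c with the string one/zero, hence [c] = one.toList.)
def parseBinary (s : String) (one : String) (zero : String) : Int :=
  s.toList.foldl (fun result c =>
    if [c] = one.toList then 2 * result + 1
    else if [c] = zero.toList then 2 * result
    else result) 0

-- ===== PORT B =====
-- bits = ''.join('1' if c == one else '0' for c in s if c == one or c == zero)
def pvBits (s : String) (one : String) (zero : String) : List Char :=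
  s.toList.filterMap (fun c =>
    if [c] = one.toList ∨ [c] = zero.toList then
      some (if [c] = one.toList then '1' else '0')
    else none)

-- int(x, 2): Horner over the binary digit characters
def pvInt2 (l : List Char) : Int :=
  l.foldl (fun acc d => 2 * acc + (if d = '1' then 1 else 0)) 0

-- return int(bits or '0', 2)
def parseBinary_alt (s : String) (one : String) (zero : String) : Int :=
  pvInt2 (if pvBits s one zero = [] then ['0'] else pvBits s one zero)

-- ===== PRECONDITION & SPEC =====
def Spec_parseBinary (s : String) (one : String) (zero : String) (out : Int) : Prop := out = parseBinary_alt s one zero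
instance (s : String) (one : String) (zero : String) (out : Int) : Decidable (Spec_parseBinary s one zero out) := by unfold Spec_parseBinary; infer_instance

-- ===== CLAIM (what is proved, stated in full; the proofs are below) =====
def Claim_equal_parseBinary : Prop := ∀ (s : String) (one : String) (zero : String), Dom_parseBinary s one zero → Spec_parseBinary s one zero (parseBinary s one zero)

-- ===== LEMMAS AND PROOFS =====

theorem pvInt2_go (one zero : String) (l : List Char) (acc : Int) :
    (l.filterMap (fun c =>
        if [c] = one.toList ∨ [c] = zero.toList then
          some (if [c] = one.toList then '1' else '0')
        else none)).foldl (fun acc d => 2 * acc + (if d = '1' then 1 else 0)) acc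
      = l.foldl (fun result c =>
          if [c] = one.toList then 2 * result + 1
          else if [c] = zero.toList then 2 * result
          else result) acc := by
  induction l generalizing acc with
  | nil => rfl
  | cons c t ih =>
    by_cases h1 : [c] = one.toList
    · simp only [List.filterMap_cons, h1, true_or, if_true, List.foldl_cons, if_pos]
      rw [ih]
    · by_cases h0 : [c] = zero.toList
      · rw [List.filterMap_cons, if_pos (Or.inr h0)]
        simp only [List.foldl_cons, if_neg h1, if_pos h0]
        simpa using ih (2 * acc)
      · simp only [List.filterMap_cons, h1, h0, or_self, if_false, List.foldl_cons,
          if_neg h1, if_neg h0, ite_false]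
        exact ih acc

theorem foldA_of_bits_nil (one zero : String) (l : List Char) (acc : Int)
    (h : l.filterMap (fun c =>
        if [c] = one.toList ∨ [c] = zero.toList then
          some (if [c] = one.toList then '1' else '0')
        else none) = []) :
    l.foldl (fun result c =>
        if [c] = one.toList then 2 * result + 1
        else if [c] = zero.toList then 2 * result
        else result) acc = acc := by
  induction l generalizing acc with
  | nil => rfl
  | cons c t ih =>
    simp only [List.filterMap_cons] at h
    by_cases h1 : [c] = one.toList
    · simp [h1] at h
    · by_cases h0 : [c] = zero.toList
      · simp [h1, h0] at h
      · simp only [h1, h0, or_self, if_false, ite_false] at h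
        simp only [List.foldl_cons, if_neg h1, if_neg h0, ite_false]
        exact ih acc h

-- ===== VERDICT (by name: the statement is the Claim_ definition above) =====
theorem parseBinary_spec : Claim_equal_parseBinary := by
  intro s one zero _
  show parseBinary s one zero = parseBinary_alt s one zero
  unfold parseBinary parseBinary_alt pvInt2 pvBits
  by_cases h : s.toList.filterMap (fun c =>
      if [c] = one.toList ∨ [c] = zero.toList then
        some (if [c] = one.toList then '1' else '0')
      else none) = []
  · rw [if_pos h, foldA_of_bits_nil one zero s.toList 0 h]
    rfl
  · rw [if_neg h]
    exact (pvInt2_go one zero s.toList 0).symm
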